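-- pv_equiv track=rewrite | github.com/yakhyazadea/AOIS_4sem | aois_2_yakhyazade.py | func_look_for_element_right
-- ===== SOURCE A (Python) =====
-- def func_look_for_element_right(element, expression, i, compare):
--     iter = i + 1
--     number = 0
--     while iter < len(expression):
--         if compare == True:
--             if expression[iter] == element:
--                 return number
--             if expression[iter] > number:
--                 number = expression[iter]
--
--         else:
--             if expression[iter] == element:
--                 return iter
--         iter += 1
-- ===== SOURCE B (Python) =====
-- def func_look_for_element_right(element, expression, i, compare):
--     n = len(expression)
--     match = next((j for j in range(i + 1, n) if expression[j] == element), None)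
--     if compare == True:
--         if match is None:
--             return None
--         m = 0
--         for j in range(i + 1, match):
--             if expression[j] > m:
--                 m = expression[j]
--         return m
--     return match
-- ===== Notes on version B (the rewrite author's own statement) =====
-- stated objective: alternative
-- what changed: B first locates the first-match index with a single search, then (only in compare mode) computes the prefix running-max with a separate fold over range(i+1, match), instead of A's one interleaved while-loop carrying both the scan index and the running max.
import Mathlib
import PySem

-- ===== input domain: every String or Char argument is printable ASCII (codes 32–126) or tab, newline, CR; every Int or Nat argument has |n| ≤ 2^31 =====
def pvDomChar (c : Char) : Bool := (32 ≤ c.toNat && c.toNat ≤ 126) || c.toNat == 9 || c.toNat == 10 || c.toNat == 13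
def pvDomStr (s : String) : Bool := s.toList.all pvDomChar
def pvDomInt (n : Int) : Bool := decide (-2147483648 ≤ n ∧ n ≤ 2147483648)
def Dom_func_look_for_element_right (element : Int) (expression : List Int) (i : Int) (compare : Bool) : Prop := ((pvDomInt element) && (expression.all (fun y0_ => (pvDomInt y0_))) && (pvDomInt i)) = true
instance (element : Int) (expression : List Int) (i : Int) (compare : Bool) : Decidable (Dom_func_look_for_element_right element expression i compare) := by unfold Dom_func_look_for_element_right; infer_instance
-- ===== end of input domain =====

-- B splits A's interleaved while-loop into a first-match search plus a separate prefix-max fold (alternative decomposition, same cost).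

-- ===== PORT A =====
-- A's while-loop: iter from i+1, running max `number`; pyGet? none (IndexError) excluded by Pre_.
def funcALoop (element : Int) (expression : List Int) (iter : Int) (number : Int) (compare : Bool) : Option Int :=
  if _h : iter < (expression.length : Int) then
    match PySem.List.pyGet? expression iter with
    | none => none   -- IndexError in Python; outside Pre_
    | some v =>
      if compare then
        if v = element then some number
        else funcALoop element expression (iter + 1) (if v > number then v else number) compare
      else
        if v = element then some iter
        else funcALoop element expression (iter + 1) number compare
  else none
termination_by ((expression.length : Int) - iter).toNat
decreasing_by all_goals omega

def func_look_for_element_right (element : Int) (expression : List Int) (i : Int) (compare : Bool) : Option Int :=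
  funcALoop element expression (i + 1) 0 compare

-- ===== PORT B =====
-- B's `next(j for j in range(i+1, n) if expression[j] == element)` search.
def funcBFind (element : Int) (expression : List Int) (j : Int) : Option Int :=
  if _h : j < (expression.length : Int) then
    match PySem.List.pyGet? expression j with
    | none => none   -- IndexError in Python; outside Pre_
    | some v => if v = element then some j else funcBFind element expression (j + 1)
  else none
termination_by ((expression.length : Int) - j).toNat
decreasing_by all_goals omega

-- B's `for j in range(i+1, match)` prefix-max loop with m = 0.
def funcBMax (expression : List Int) (lo hi : Int) : Int :=
  (PySem.List.pyRange lo hi 1).foldl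
    (fun m j => let v := PySem.List.pyGetD expression j 0
                if v > m then v else m) 0

def func_look_for_element_right_alt (element : Int) (expression : List Int) (i : Int) (compare : Bool) : Option Int :=
  let m := funcBFind element expression (i + 1)
  if compare then
    match m with
    | none => none
    | some j => some (funcBMax expression (i + 1) j)
  else m

-- ===== PRECONDITION & SPEC =====
-- Pre_ excludes exactly the inputs where A (and B) raise IndexError: a start index i+1 below -len(expression).
def Pre_func_look_for_element_right (element : Int) (expression : List Int) (i : Int) (compare : Bool) : Prop :=
  -(expression.length : Int) ≤ i + 1
instance (element : Int) (expression : List Int) (i : Int) (compare : Bool) : Decidable (Pre_func_look_for_element_right element expression i compare) := by unfold Pre_func_look_for_element_right; infer_instance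

def pvWitness_func_look_for_element_right : Int × List Int × Int × Bool := (3, [5, 3, 1], 0, true)

def Spec_func_look_for_element_right (element : Int) (expression : List Int) (i : Int) (compare : Bool) (out : Option Int) : Prop := out = func_look_for_element_right_alt element expression i compare
instance (element : Int) (expression : List Int) (i : Int) (compare : Bool) (out : Option Int) : Decidable (Spec_func_look_for_element_right element expression i compare out) := by unfold Spec_func_look_for_element_right; infer_instance

-- ===== CLAIM (what is proved, stated in full; the proofs are below) =====
def Claim_equal_func_look_for_element_right : Prop := ∀ (element : Int) (expression : List Int) (i : Int) (compare : Bool), Dom_func_look_for_element_right element expression i compare → Pre_func_look_for_element_right element expression i compare → Spec_func_look_for_element_right element expression i compare (func_look_for_element_right element expression i compare)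

-- ===== LEMMAS AND PROOFS =====

-- B's search only returns indices ≥ its starting point.
theorem funcBFind_ge (element : Int) (expression : List Int) (j : Int) (k : Int)
    (h : funcBFind element expression j = some k) : j ≤ k := by
  unfold funcBFind at h
  split at h
  · rename_i hlt
    cases hg : PySem.List.pyGet? expression j with
    | none => rw [hg] at h; simp at h
    | some v =>
      rw [hg] at h
      dsimp only at h
      split at h
      · simp at h; omega
      · have := funcBFind_ge element expression (j + 1) k h
        omega
  · simp at h
termination_by ((expression.length : Int) - j).toNat
decreasing_by all_goals omega

-- Core invariant: A's loop from iter with accumulator num equals B's search-then-fold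
-- with the prefix-max fold seeded by num.
theorem funcALoop_eq (element : Int) (expression : List Int) (iter num : Int) (compare : Bool)
    (hpre : -(expression.length : Int) ≤ iter) :
    funcALoop element expression iter num compare =
      (let m := funcBFind element expression iter
       if compare then
         match m with
         | none => none
         | some j => some ((PySem.List.pyRange iter j 1).foldl
             (fun acc x => let v := PySem.List.pyGetD expression x 0
                           if v > acc then v else acc) num)
       else m) := by
  unfold funcALoop funcBFind
  split
  · rename_i hlt
    cases hg : PySem.List.pyGet? expression iter with
    | none =>
      exfalso
      rw [PySem.List.pyGet?_eq_none_iff] at hg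
      exact hg (by simp [PySem.Raise.InRange]; omega)
    | some v =>
      dsimp only
      by_cases hv : v = element
      · cases compare <;>
          simp [hv, PySem.List.pyRange_one_eq_nil (le_refl iter)]
      · have hvD : PySem.List.pyGetD expression iter 0 = v := by
          simp [PySem.List.pyGetD, hg]
        cases compare with
        | false =>
          have ih := funcALoop_eq element expression (iter + 1) num false (by omega)
          simpa [hv] using ih
        | true =>
          have ih := funcALoop_eq element expression (iter + 1)
            (if v > num then v else num) true (by omega)
          rw [ih]
          cases hf : funcBFind element expression (iter + 1) with
          | none => simp [hv]
          | some j =>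
            have hij : iter + 1 ≤ j := funcBFind_ge element expression (iter + 1) j hf
            have hcons := PySem.List.pyRange_one_cons (show iter < j by omega)
            simp [hv, hcons, hvD]
  · cases compare <;> simp
termination_by ((expression.length : Int) - iter).toNat
decreasing_by all_goals omega

-- ===== VERDICT (by name: the statement is the Claim_ definition above) =====
theorem func_look_for_element_right_spec : Claim_equal_func_look_for_element_right := by
  intro element expression i compare _hdom hpre
  unfold Spec_func_look_for_element_right func_look_for_element_right func_look_for_element_right_alt funcBMax
  exact funcALoop_eq element expression (i + 1) 0 compare hpre
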